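-- pv_equiv track=rewrite | github.com/SuyeonSun/coding_test | 백준/Silver/17266. 어두운 굴다리/어두운 굴다리.py | find_min_brightness
-- ===== SOURCE A (Python) =====
-- def is_enough_light(D, lights, N):
--     # 첫 가로등이 0을 비추는지 확인
--     if lights[0] > D:
--         return False
--
--     # 각 가로등 사이의 거리가 D로 커버 가능한지 확인
--     for i in range(1, len(lights)):
--         if lights[i] - lights[i-1] > 2 * D:
--             return False
--
--     # 마지막 가로등이 N을 비추는지 확인
--     if N - lights[-1] > D:
--         return False
--
--     return True
--
-- def find_min_brightness(N, lights):
--     left, right = 0, N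
--     answer = right
--
--     while left <= right:
--         mid = (left + right) // 2
--
--         if is_enough_light(mid, lights, N):
--             answer = mid
--             right = mid - 1  # 더 작은 밝기에서도 가능한지 확인
--         else:
--             left = mid + 1  # 더 큰 밝기를 시도
--
--     return answer
-- ===== SOURCE B (Python) =====
-- def find_min_brightness(N, lights):
--     # one pass: brightness needed = max(first light, ceil(max gap / 2), N - last light),
--     # clamped to the search interval [0, N] that the problem statement prescribes
--     m = lights[0]
--     prev = lights[0]
--     for x in lights[1:]:
--         m = max(m, -((prev - x) // 2))  # ceil((x - prev) / 2)
--         prev = x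
--     m = max(m, N - lights[-1])
--     return min(N, max(0, m))
-- ===== Notes on version B (the rewrite author's own statement) =====
-- stated objective: faster
-- what changed: Replaces the binary search over D in [0,N] (each probe rescanning all lights) by a single pass computing the exact threshold max(first, ceil(max gap/2), N-last), clamped to [0,N].
-- outside the precondition, e.g. on find_min_brightness(-1, []): A returns -1, B raises IndexError
import Mathlib
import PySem

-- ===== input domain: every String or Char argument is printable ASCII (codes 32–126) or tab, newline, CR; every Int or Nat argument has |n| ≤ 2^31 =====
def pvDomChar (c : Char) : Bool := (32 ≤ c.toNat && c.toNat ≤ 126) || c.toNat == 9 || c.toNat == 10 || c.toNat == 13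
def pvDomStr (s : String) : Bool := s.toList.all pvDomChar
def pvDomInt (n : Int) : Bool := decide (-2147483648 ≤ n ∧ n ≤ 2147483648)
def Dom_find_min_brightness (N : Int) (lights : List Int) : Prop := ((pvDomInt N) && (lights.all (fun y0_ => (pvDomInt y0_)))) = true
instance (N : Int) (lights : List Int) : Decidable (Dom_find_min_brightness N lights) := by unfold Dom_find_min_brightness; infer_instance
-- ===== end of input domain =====

-- B replaces A's binary search over D by a one-pass computation of the exact threshold, clamped to [0, N].

-- ===== PORT A =====
-- for i in range(1, len(lights)): if lights[i] - lights[i-1] > 2*D: return False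
-- (index i stays ≥ 1 and < len, so plain nonnegative List.getD is exact here)
def enoughLoop (D : Int) (lights : List Int) (i : Nat) : Bool :=
  if i < lights.length then
    if lights.getD i 0 - lights.getD (i - 1) 0 > 2 * D then false
    else enoughLoop D lights (i + 1)
  else true
termination_by lights.length - i

def is_enough_light (D : Int) (lights : List Int) (N : Int) : Bool :=
  if PySem.List.pyGetD lights 0 0 > D then false
  else if enoughLoop D lights 1 = false then false
  else if N - PySem.List.pyGetD lights (-1) 0 > D then false
  else true

-- while left <= right: mid = (left+right)//2; …
def bsLoop (lights : List Int) (N left right answer : Int) : Int :=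
  if h : left ≤ right then
    let mid := PySem.Int.floordiv (left + right) 2
    if is_enough_light mid lights N then bsLoop lights N left (mid - 1) mid
    else bsLoop lights N (mid + 1) right answer
  else answer
termination_by (right - left + 1).toNat
decreasing_by
  · have := PySem.Int.floordiv_two_mid_bounds h; omega
  · have := PySem.Int.floordiv_two_mid_bounds h; omega

def find_min_brightness (N : Int) (lights : List Int) : Int :=
  bsLoop lights N 0 N N

-- ===== PORT B =====
def find_min_brightness_alt (N : Int) (lights : List Int) : Int :=
  let first := PySem.List.pyGetD lights 0 0
  let mp := (lights.drop 1).foldl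
      (fun (p : Int × Int) x => (max p.1 (-(PySem.Int.floordiv (p.2 - x) 2)), x))
      (first, first)
  let m := max mp.1 (N - PySem.List.pyGetD lights (-1) 0)
  min N (max 0 m)

-- ===== PRECONDITION & SPEC =====
-- Pre_ excludes only the empty light list: there A raises IndexError (lights[0]) whenever N >= 0, and for N < 0 returns the accidental initial answer N; B raises there too.
def Pre_find_min_brightness (N : Int) (lights : List Int) : Prop := lights ≠ []
instance (N : Int) (lights : List Int) : Decidable (Pre_find_min_brightness N lights) := by
  unfold Pre_find_min_brightness; infer_instance

def pvWitness_find_min_brightness : Int × List Int := (5, [1, 3])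

def Spec_find_min_brightness (N : Int) (lights : List Int) (out : Int) : Prop := out = find_min_brightness_alt N lights
instance (N : Int) (lights : List Int) (out : Int) : Decidable (Spec_find_min_brightness N lights out) := by unfold Spec_find_min_brightness; infer_instance

-- ===== CLAIM (what is proved, stated in full; the proofs are below) =====
def Claim_equal_find_min_brightness : Prop := ∀ (N : Int) (lights : List Int), Dom_find_min_brightness N lights → Pre_find_min_brightness N lights → Spec_find_min_brightness N lights (find_min_brightness N lights)

-- ===== LEMMAS AND PROOFS =====

-- sequential gap check with an explicit previous element (shape shared by both ports)
def pairCheck (D prev : Int) : List Int → Bool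
  | [] => true
  | y :: t => if y - prev > 2 * D then false else pairCheck D y t

theorem enoughLoop_shift (D a : Int) (l : List Int) :
    ∀ (k i : Nat), l.length - i ≤ k →
      enoughLoop D (a :: l) (i + 2) = enoughLoop D l (i + 1) := by
  intro k
  induction k with
  | zero =>
    intro i hi
    rw [enoughLoop]
    conv_rhs => rw [enoughLoop]
    rw [if_neg (by simp; omega : ¬ (i + 2 < (a :: l).length)),
        if_neg (by omega : ¬ (i + 1 < l.length))]
  | succ k ih =>
    intro i hi
    rw [enoughLoop]
    conv_rhs => rw [enoughLoop]
    by_cases h : i + 1 < l.length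
    · rw [if_pos (by simp; omega : i + 2 < (a :: l).length), if_pos h]
      have e1 : (a :: l).getD (i + 2) 0 = l.getD (i + 1) 0 := rfl
      have e2 : (a :: l).getD (i + 2 - 1) 0 = l.getD (i + 1 - 1) 0 := rfl
      have hrec : enoughLoop D (a :: l) (i + 2 + 1) = enoughLoop D l (i + 1 + 1) :=
        ih (i + 1) (by omega)
      rw [e1, e2, hrec]
    · rw [if_neg (by simp; omega : ¬ (i + 2 < (a :: l).length)), if_neg h]

theorem enoughLoop_eq_pairCheck (D : Int) :
    ∀ (t : List Int) (a : Int), enoughLoop D (a :: t) 1 = pairCheck D a t := by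
  intro t
  induction t with
  | nil =>
    intro a
    rw [enoughLoop]
    simp [pairCheck]
  | cons b t ih =>
    intro a
    rw [enoughLoop]
    have hlen : (1 : Nat) < (a :: b :: t).length := by simp
    rw [if_pos hlen]
    have e1 : (a :: b :: t).getD 1 0 = b := rfl
    have e2 : (a :: b :: t).getD (1 - 1) 0 = a := rfl
    rw [e1, e2]
    have hshift : enoughLoop D (a :: b :: t) 2 = enoughLoop D (b :: t) 1 :=
      enoughLoop_shift D a (b :: t) ((b :: t).length) 0 (by omega)
    show (if b - a > 2 * D then false else enoughLoop D (a :: b :: t) 2) = pairCheck D a (b :: t)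
    rw [hshift, ih b]
    rfl

theorem fold_fst (D : Int) :
    ∀ (t : List Int) (m prev : Int),
      (decide (m ≤ D) && pairCheck D prev t) =
        decide ((t.foldl
          (fun (p : Int × Int) x => (max p.1 (-(PySem.Int.floordiv (p.2 - x) 2)), x))
          (m, prev)).1 ≤ D) := by
  intro t
  induction t with
  | nil => intro m prev; simp [pairCheck]
  | cons y t ih =>
    intro m prev
    have hfd : PySem.Int.floordiv (prev - y) 2 = (prev - y) / 2 :=
      PySem.Int.floordiv_eq_ediv_of_pos (by norm_num)
    simp only [List.foldl_cons, pairCheck]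
    refine Eq.trans ?_ (ih (max m (-(PySem.Int.floordiv (prev - y) 2))) y)
    rw [hfd]
    by_cases hgt : y - prev > 2 * D
    · have hns : ¬ (max m (-((prev - y) / 2)) ≤ D) := by omega
      simp [hgt, hns]
    · by_cases hm : m ≤ D
      · have hs : max m (-((prev - y) / 2)) ≤ D := by omega
        simp [hgt, hm, hs]
      · have hns : ¬ (max m (-((prev - y) / 2)) ≤ D) := by omega
        simp [hgt, hm, hns]

theorem enough_char (N x : Int) (rest : List Int) (D : Int) :
    is_enough_light D (x :: rest) N =
      decide (max ((rest.foldl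
          (fun (p : Int × Int) x => (max p.1 (-(PySem.Int.floordiv (p.2 - x) 2)), x))
          (x, x)).1)
        (N - PySem.List.pyGetD (x :: rest) (-1) 0) ≤ D) := by
  unfold is_enough_light
  rw [PySem.List.pyGetD_zero_cons, enoughLoop_eq_pairCheck]
  have hfold := fold_fst D rest x x
  set F := (rest.foldl
      (fun (p : Int × Int) x => (max p.1 (-(PySem.Int.floordiv (p.2 - x) 2)), x))
      (x, x)).1 with hF
  set L := PySem.List.pyGetD (x :: rest) (-1) 0 with hL
  by_cases hx : x > D
  · have : decide (x ≤ D) = false := by simp; omega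
    rw [this] at hfold
    simp only [Bool.false_and] at hfold
    have hFgt : ¬ (F ≤ D) := by
      intro hFle
      simp [hFle] at hfold
    rw [if_pos hx]
    have : ¬ (max F (N - L) ≤ D) := by omega
    simp [this]
  · rw [if_neg hx]
    have hxd : decide (x ≤ D) = true := by simp; omega
    rw [hxd, Bool.true_and] at hfold
    by_cases hpc : pairCheck D x rest = true
    · have hFle : F ≤ D := by
        have := hfold; rw [hpc] at this; simpa using this.symm
      rw [if_neg (by simp [hpc])]
      by_cases hN : N - L > D
      · rw [if_pos hN]
        have : ¬ (max F (N - L) ≤ D) := by omega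
        simp [this]
      · rw [if_neg hN]
        have : max F (N - L) ≤ D := by omega
        simp [this]
    · have hpcf : pairCheck D x rest = false := by
        cases hh : pairCheck D x rest
        · rfl
        · exact absurd hh hpc
      have hFgt : ¬ (F ≤ D) := by
        intro hFle
        rw [hpcf] at hfold
        simp [hFle] at hfold
      rw [if_pos (by simp [hpcf])]
      have : ¬ (max F (N - L) ≤ D) := by omega
      simp [this]

theorem bsLoop_char (lights : List Int) (N M : Int)
    (H : ∀ D, is_enough_light D lights N = decide (M ≤ D)) :
    ∀ (k : Nat) (l r ans : Int), (r - l + 1).toNat ≤ k →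
      bsLoop lights N l r ans =
        if l ≤ r then (if M ≤ r then max l M else ans) else ans := by
  intro k
  induction k with
  | zero =>
    intro l r ans h
    rw [bsLoop]
    have hlr : ¬ l ≤ r := by omega
    simp [hlr]
  | succ k ih =>
    intro l r ans h
    rw [bsLoop]
    by_cases hlr : l ≤ r
    · obtain ⟨h1, h2⟩ := PySem.Int.floordiv_two_mid_bounds hlr
      rw [dif_pos hlr]
      show (if is_enough_light (PySem.Int.floordiv (l + r) 2) lights N then
              bsLoop lights N l (PySem.Int.floordiv (l + r) 2 - 1) (PySem.Int.floordiv (l + r) 2)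
            else bsLoop lights N (PySem.Int.floordiv (l + r) 2 + 1) r ans) = _
      set mid := PySem.Int.floordiv (l + r) 2 with hmid
      rw [H mid]
      by_cases hM : M ≤ mid
      · rw [if_pos (by simp [hM])]
        rw [ih l (mid - 1) mid (by omega)]
        rw [if_pos hlr, if_pos (by omega : M ≤ r)]
        split_ifs <;> omega
      · rw [if_neg (by simp [hM])]
        rw [ih (mid + 1) r ans (by omega)]
        rw [if_pos hlr]
        split_ifs <;> omega
    · rw [dif_neg hlr, if_neg hlr]

-- ===== VERDICT (by name: the statement is the Claim_ definition above) =====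
theorem find_min_brightness_spec : Claim_equal_find_min_brightness := by
  intro N lights hdom hpre
  unfold Spec_find_min_brightness
  cases lights with
  | nil => exact absurd rfl hpre
  | cons x rest =>
    have H := enough_char N x rest
    rw [find_min_brightness,
        bsLoop_char (x :: rest) N _ H ((N - 0 + 1).toNat) 0 N N le_rfl]
    unfold find_min_brightness_alt
    rw [PySem.List.pyGetD_zero_cons]
    simp only [List.drop_one, List.tail_cons]
    split_ifs <;> omega
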